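-- pv_equiv track=rewrite | github.com/fazli1702/H2-Computing | Daily sprint/Day 19.py | digitlst
-- ===== SOURCE A (Python) =====
-- def digitlst(n):
--     if n == 0:
--         return []
--     else:
--         x = str(n)
--         lst = []
--         for ele in x:
--             lst.append(int(ele))
--         lst.sort()
--         return lst[::-1]
-- ===== SOURCE B (Python) =====
-- def digitlst(n):
--     # counting sort over the ten digit buckets instead of comparison sort + reverse
--     if n == 0:
--         return []
--     count = [0] * 10
--     for ch in str(n):
--         count[int(ch)] += 1
--     out = []
--     for d in range(9, -1, -1):
--         out += [d] * count[d]
--     return out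
-- ===== Notes on version B (the rewrite author's own statement) =====
-- stated objective: alternative
-- what changed: Replaces the comparison sort plus [::-1] reversal with a 10-bucket counting sort: tally each digit of str(n) into count[0..9], then emit each digit d from 9 down to 0 count[d] times.
import Mathlib
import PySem

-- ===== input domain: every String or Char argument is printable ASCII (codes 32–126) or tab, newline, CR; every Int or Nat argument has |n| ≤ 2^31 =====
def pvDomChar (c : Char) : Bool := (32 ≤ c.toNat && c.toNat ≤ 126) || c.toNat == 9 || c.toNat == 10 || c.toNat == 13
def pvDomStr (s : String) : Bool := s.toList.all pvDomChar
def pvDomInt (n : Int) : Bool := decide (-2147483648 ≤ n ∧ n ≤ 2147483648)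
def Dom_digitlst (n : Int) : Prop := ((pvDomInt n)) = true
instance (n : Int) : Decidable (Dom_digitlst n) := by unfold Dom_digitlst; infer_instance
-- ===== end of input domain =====

-- B replaces A's comparison sort + [::-1] reversal by a 10-bucket counting sort over the digits (alternative decomposition).

-- ===== PORT A =====
-- int(ele) for a single character; 'none' (Python ValueError, e.g. on '-') only occurs for n < 0, excluded by Pre_
def pvInt1 (c : Char) : Int := (PySem.Int.ofChars? [c]).getD 0

def digitlst (n : Int) : List Int :=
  if n = 0 then []
  else
    let lst := (PySem.Int.toChars n).foldl (fun acc ele => acc ++ [pvInt1 ele]) []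
    (PySem.List.slice? (PySem.List.sorted lst (fun v => v) false) none none (-1)).getD []

-- ===== PORT B =====
def digitlst_alt (n : Int) : List Int :=
  if n = 0 then []
  else
    let count : List Int := (PySem.Int.toChars n).foldl
      (fun cnt ch => PySem.List.pySetD cnt (pvInt1 ch) (PySem.List.pyGetD cnt (pvInt1 ch) 0 + 1))
      (PySem.List.pyRepeat [0] 10)
    (PySem.List.pyRange 9 (-1) (-1)).foldl
      (fun out d => out ++ PySem.List.pyRepeat [d] (PySem.List.pyGetD count d 0)) []

-- ===== PRECONDITION & SPEC =====
-- A raises ValueError on n < 0 (int('-') on the sign character of str(n)); Pre_ excludes exactly those inputs.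
def Pre_digitlst (n : Int) : Prop := 0 ≤ n
instance (n : Int) : Decidable (Pre_digitlst n) := by unfold Pre_digitlst; infer_instance
def pvWitness_digitlst : Int := (102)

def Spec_digitlst (n : Int) (out : List Int) : Prop := out = digitlst_alt n
instance (n : Int) (out : List Int) : Decidable (Spec_digitlst n out) := by unfold Spec_digitlst; infer_instance

-- ===== CLAIM (what is proved, stated in full; the proofs are below) =====
def Claim_equal_digitlst : Prop := ∀ (n : Int), Dom_digitlst n → Pre_digitlst n → Spec_digitlst n (digitlst n)

-- ===== LEMMAS AND PROOFS =====

-- every character produced by Nat.toDigitsCore base 10 is a decimal digit (value 0..9 under pvInt1)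
set_option maxRecDepth 4096 in
lemma pvInt1_digitChar (m : Nat) (h : m < 10) : 0 ≤ pvInt1 m.digitChar ∧ pvInt1 m.digitChar ≤ 9 := by
  interval_cases m <;> exact ⟨by decide, by decide⟩

lemma toDigitsCore_bounds (f : Nat) : ∀ (n : Nat) (acc : List Char),
    (∀ c ∈ acc, 0 ≤ pvInt1 c ∧ pvInt1 c ≤ 9) →
    ∀ c ∈ Nat.toDigitsCore 10 f n acc, 0 ≤ pvInt1 c ∧ pvInt1 c ≤ 9 := by
  induction f with
  | zero => intro n acc hacc c hc; exact hacc c hc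
  | succ f ih =>
    intro n acc hacc c hc
    rw [Nat.toDigitsCore] at hc
    by_cases hz : n / 10 = 0
    · simp only [hz, if_true] at hc
      rcases List.mem_cons.mp hc with h | h
      · subst h; exact pvInt1_digitChar _ (Nat.mod_lt _ (by norm_num))
      · exact hacc c h
    · simp only [hz, if_false] at hc
      refine ih _ _ ?_ c hc
      intro c' hc'
      rcases List.mem_cons.mp hc' with h | h
      · subst h; exact pvInt1_digitChar _ (Nat.mod_lt _ (by norm_num))
      · exact hacc c' h

lemma toChars_bounds (n : Int) (hn : 0 ≤ n) :
    ∀ c ∈ PySem.Int.toChars n, 0 ≤ pvInt1 c ∧ pvInt1 c ≤ 9 := by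
  unfold PySem.Int.toChars
  rw [if_neg (by omega)]
  exact toDigitsCore_bounds _ _ [] (by simp)

-- the digit-value list both programs consume
def pvDigits (n : Int) : List Int := (PySem.Int.toChars n).map pvInt1

-- count-array invariant: after folding the tally loop, bucket d holds (prior value) + (count of d among the digits)
lemma count_invariant (cs : List Char) : ∀ (cnt : List Int), cnt.length = 10 →
    (∀ c ∈ cs, 0 ≤ pvInt1 c ∧ pvInt1 c ≤ 9) →
    (cs.foldl (fun cnt ch => PySem.List.pySetD cnt (pvInt1 ch) (PySem.List.pyGetD cnt (pvInt1 ch) 0 + 1)) cnt).length = 10 ∧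
    ∀ d : Nat, d < 10 →
      PySem.List.pyGetD (cs.foldl (fun cnt ch => PySem.List.pySetD cnt (pvInt1 ch) (PySem.List.pyGetD cnt (pvInt1 ch) 0 + 1)) cnt) (d : Int) 0
        = PySem.List.pyGetD cnt (d : Int) 0 + ((cs.map pvInt1).count (d : Int) : Int) := by
  induction cs with
  | nil => intro cnt hlen _; simp [hlen]
  | cons c cs ih =>
    intro cnt hlen hb
    have hc := hb c (List.mem_cons_self ..)
    set v : Nat := (pvInt1 c).toNat with hv
    have hcv : pvInt1 c = (v : Int) := by omega
    have hv10 : v < 10 := by omega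
    have hset : (PySem.List.pySetD cnt (pvInt1 c) (PySem.List.pyGetD cnt (pvInt1 c) 0 + 1)).length = 10 := by
      rw [hcv]
      simp [hlen]
    obtain ⟨hlen', hrec⟩ := ih _ hset (fun c' hc' => hb c' (List.mem_cons_of_mem _ hc'))
    refine ⟨by simpa using hlen', ?_⟩
    intro d hd
    simp only [List.foldl_cons]
    rw [hrec d hd, hcv,
      PySem.List.pyGetD_pySetD_natCast cnt v d _ _ (by omega)]
    by_cases hdv : d = v
    · subst hdv
      simp [hcv]
      omega
    · have : ((v : Int)) ≠ (d : Int) := by omega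
      simp [hcv, hdv, this]

-- blocks of equal values, emitted in key order, form a ≤-sorted list
lemma pairwise_flatMap_replicate (ds : List Int) (hds : ds.Pairwise (· ≤ ·)) (f : Int → Nat) :
    (ds.flatMap (fun d => List.replicate (f d) d)).Pairwise (fun a b => a ≤ b) := by
  induction ds with
  | nil => simp
  | cons d ds ih =>
    rw [List.flatMap_cons, List.pairwise_append]
    refine ⟨List.pairwise_replicate.mpr (Or.inr le_rfl), ih (List.Pairwise.sublist (List.sublist_cons_self _ _) hds), ?_⟩
    intro a ha b hbm
    rw [List.mem_replicate] at ha
    obtain ⟨d', hd', hb'⟩ := List.mem_flatMap.mp hbm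
    rw [List.mem_replicate] at hb'
    have := (List.pairwise_cons.mp hds).1 d' hd'
    omega

-- descending bucket emission equals reverse of the ascending sort, for any list of values in 0..9
lemma bucket_eq_reverse_sorted (L : List Int) (hb : ∀ x ∈ L, 0 ≤ x ∧ x ≤ 9) :
    ([9, 8, 7, 6, 5, 4, 3, 2, 1, 0] : List Int).flatMap (fun d => List.replicate (L.count d) d)
      = (PySem.List.sorted L (fun v => v) false).reverse := by
  have hsorted : PySem.List.sorted L (fun v => v) false
      = ([0, 1, 2, 3, 4, 5, 6, 7, 8, 9] : List Int).flatMap (fun d => List.replicate (L.count d) d) := by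
    apply PySem.List.sorted_id_eq_of_perm_of_pairwise
    · rw [List.perm_iff_count]
      intro a
      by_cases ha : a ∈ L
      · obtain ⟨h0, h9⟩ := hb a ha
        interval_cases a <;> simp [List.flatMap, List.count_append, List.count_replicate]
      · have h0 : L.count a = 0 := List.count_eq_zero_of_not_mem ha
        have key : ∀ d : Int, List.count a (List.replicate (L.count d) d) = 0 := by
          intro d
          rw [List.count_replicate]
          by_cases hda : d = a
          · subst hda; simp [h0]
          · simp [hda]
        simp [List.flatMap, List.count_append, key, h0]
    · exact pairwise_flatMap_replicate _ (by decide) _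
  rw [hsorted]
  simp [List.flatMap, List.reverse_append]

-- ===== VERDICT (by name: the statement is the Claim_ definition above) =====
theorem digitlst_spec : Claim_equal_digitlst := by
  intro n _ hpre
  unfold Spec_digitlst digitlst digitlst_alt
  by_cases hz : n = 0
  · simp [hz]
  · rw [if_neg hz, if_neg hz]
    have hb := toChars_bounds n hpre
    -- A's loop builds the digit list
    rw [PySem.List.foldl_append_singleton_eq_map]
    simp only [List.nil_append]
    -- B's count array
    have hz10 : PySem.List.pyRepeat ([0] : List Int) 10 = List.replicate 10 0 := by
      simp [PySem.List.pyRepeat_singleton]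
    obtain ⟨_, hcnt⟩ := count_invariant (PySem.Int.toChars n)
      (PySem.List.pyRepeat [0] 10) (by rw [hz10]; simp) hb
    -- B's emission loop
    rw [PySem.List.foldl_append_eq_flatMap]
    simp only [List.nil_append]
    have hrange : PySem.List.pyRange 9 (-1) (-1) = ([9, 8, 7, 6, 5, 4, 3, 2, 1, 0] : List Int) := by decide
    rw [hrange]
    have hflat : ([9, 8, 7, 6, 5, 4, 3, 2, 1, 0] : List Int).flatMap
        (fun d => PySem.List.pyRepeat [d]
          (PySem.List.pyGetD ((PySem.Int.toChars n).foldl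
            (fun cnt ch => PySem.List.pySetD cnt (pvInt1 ch) (PySem.List.pyGetD cnt (pvInt1 ch) 0 + 1))
            (PySem.List.pyRepeat [0] 10)) d 0))
        = ([9, 8, 7, 6, 5, 4, 3, 2, 1, 0] : List Int).flatMap
            (fun d => List.replicate (((PySem.Int.toChars n).map pvInt1).count d) d) := by
      apply List.flatMap_congr
      intro d hd
      have hd10 : ∃ k : Nat, k < 10 ∧ d = (k : Int) := by
        fin_cases hd <;> exact ⟨_, by norm_num, rfl⟩
      obtain ⟨k, hk, rfl⟩ := hd10
      rw [PySem.List.pyRepeat_singleton, hcnt k hk]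
      have : PySem.List.pyGetD (PySem.List.pyRepeat ([0] : List Int) 10) (k : Int) 0 = 0 := by
        rw [hz10]; interval_cases k <;> rfl
      rw [this, zero_add]
      simp
    rw [hflat, bucket_eq_reverse_sorted _ (by intro x hx; obtain ⟨c, hc, rfl⟩ := List.mem_map.mp hx; exact hb c hc)]
    rw [PySem.List.slice?_none_none_neg_one]
    rfl
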